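-- pv_equiv track=rewrite | github.com/LucasahYA/dreamschool-tests | 字符串替换.py | replace_repeated_chars
-- ===== SOURCE A (Python) =====
-- def replace_repeated_chars(input_string, k):
--     # 初始化输出字符串和一个字典，用于跟踪字符及其上次出现的位置
--     output = ""
--     last_seen = {}
--
--     # 遍历输入字符串中的每个字符
--     for i, char in enumerate(input_string):
--         # 如果这个字符之前出现过，并且当前位置与上次出现位置的差值小于等于k，则用'-'替换
--         if char in last_seen and i - last_seen[char] <= k:
--             output += "-"
--         else:
--             output += char
--
--         # 更新该字符的最后出现位置
--         last_seen[char] = i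
--
--     return output
-- ===== SOURCE B (Python) =====
-- def replace_repeated_chars(input_string, k):
--     # sliding window of the previous min(i, k) characters, kept as a count multiset
--     counts = {}
--     out = []
--     for i, ch in enumerate(input_string):
--         out.append('-' if counts.get(ch, 0) > 0 else ch)
--         if k > 0:
--             counts[ch] = counts.get(ch, 0) + 1
--             j = i - k  # index leaving the window before the next step
--             if j >= 0:
--                 counts[input_string[j]] = counts[input_string[j]] - 1
--     return ''.join(out)
-- ===== Notes on version B (the rewrite author's own statement) =====
-- stated objective: alternative
-- what changed: B drops A's last-seen-position dict and absolute-position comparison: it maintains an expiring sliding-window multiset (a dict of counts of the previous min(i,k) characters, incremented on entry and decremented when an index leaves the window) and answers 'seen within distance k?' by count > 0, building the output with a list and ''.join.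
import Mathlib
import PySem

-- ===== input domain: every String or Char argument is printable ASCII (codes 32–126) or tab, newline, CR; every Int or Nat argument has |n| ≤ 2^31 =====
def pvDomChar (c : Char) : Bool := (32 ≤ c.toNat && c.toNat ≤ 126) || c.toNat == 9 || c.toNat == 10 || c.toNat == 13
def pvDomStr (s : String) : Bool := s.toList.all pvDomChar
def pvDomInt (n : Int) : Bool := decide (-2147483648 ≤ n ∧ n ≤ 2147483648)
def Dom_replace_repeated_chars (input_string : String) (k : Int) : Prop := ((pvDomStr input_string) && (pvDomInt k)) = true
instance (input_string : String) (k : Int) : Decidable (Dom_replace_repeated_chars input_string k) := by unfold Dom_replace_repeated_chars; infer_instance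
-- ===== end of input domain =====

-- B replaces A's last-seen-position dict by an expiring sliding-window count multiset
-- of the previous min(i, k) characters (same return value; no side effects in either version).

-- ===== PORT A =====
-- the for-loop of A as structural recursion over enumerate(input_string), state = (output, last_seen)
def goA (k : Int) : List (Int × Char) → List Char → PySem.Dict Char Int → List Char
  | [], out, _ => out
  | (i, c) :: rest, out, last =>
      let hit : Bool := match PySem.Dict.get? last c with
        | some j => decide (i - j ≤ k)
        | none => false
      goA k rest (out ++ [if hit then '-' else c]) (PySem.Dict.insert last c i)

def replace_repeated_chars (input_string : String) (k : Int) : String :=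
  String.ofList (goA k (PySem.List.enumerate input_string.toList 0) [] PySem.Dict.empty)

-- ===== PORT B =====
-- the for-loop of B, state = (output, counts); counts[s[j]] -= 1 is ported with
-- Dict.modify (default 0) and the lookup input_string[j] with pyGet? (j is always in
-- range here: 0 ≤ j = i - k < i < len, so the .getD ' ' default is never used)
def goB (chars : List Char) (k : Int) : List (Int × Char) → List Char → PySem.Dict Char Int → List Char
  | [], out, _ => out
  | (i, c) :: rest, out, counts =>
      let out' := out ++ [if counts.getD c 0 > 0 then '-' else c]
      if k > 0 then
        let counts1 := counts.modify c 0 (· + 1)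
        let j := i - k
        let counts2 := if 0 ≤ j then
            counts1.modify ((PySem.List.pyGet? chars j).getD ' ') 0 (· - 1)
          else counts1
        goB chars k rest out' counts2
      else goB chars k rest out' counts

def replace_repeated_chars_alt (input_string : String) (k : Int) : String :=
  String.ofList (goB input_string.toList k (PySem.List.enumerate input_string.toList 0) [] PySem.Dict.empty)

-- ===== PRECONDITION & SPEC =====
def Spec_replace_repeated_chars (input_string : String) (k : Int) (out : String) : Prop := out = replace_repeated_chars_alt input_string k
instance (input_string : String) (k : Int) (out : String) : Decidable (Spec_replace_repeated_chars input_string k out) := by unfold Spec_replace_repeated_chars; infer_instance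

-- ===== CLAIM (what is proved, stated in full; the proofs are below) =====
def Claim_equal_replace_repeated_chars : Prop := ∀ (input_string : String) (k : Int), Dom_replace_repeated_chars input_string k → Spec_replace_repeated_chars input_string k (replace_repeated_chars input_string k)

-- ===== LEMMAS AND PROOFS =====

-- the window slice only looks into the already-processed prefix
theorem slice_window (pre rest : List Char) (lo : Int) (hlo : 0 ≤ lo) :
    PySem.List.slice (pre ++ rest) (some lo) (some (pre.length : Int)) =
      pre.drop lo.toNat := by
  rw [PySem.List.slice_toNat (ha := hlo) (hb := by positivity)]
  by_cases hle : lo.toNat ≤ pre.length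
  · rw [List.drop_append, List.take_left' (by simp)]
  · have h0 : (pre.length : Int).toNat - lo.toNat = 0 := by omega
    rw [h0, List.take_zero]
    exact (List.drop_eq_nil_of_le (by omega)).symm

-- index (from offset n) of the last occurrence of c in a list
def lastOccFrom (n : Int) : List Char → Char → Option Int
  | [], _ => none
  | a :: t, c => match lastOccFrom (n + 1) t c with
      | some j => some j
      | none => if a = c then some n else none

theorem lastOccFrom_append_singleton (n : Int) (xs : List Char) (a c : Char) :
    lastOccFrom n (xs ++ [a]) c =
      if a = c then some (n + xs.length) else lastOccFrom n xs c := by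
  induction xs generalizing n with
  | nil => simp [lastOccFrom]
  | cons x t ih =>
      simp only [List.cons_append, lastOccFrom, ih]
      by_cases h : a = c
      · simp only [if_pos h]
        show some (n + 1 + (t.length : Int)) = some (n + ((x :: t).length : Int))
        congr 1
        push_cast [List.length_cons]
        ring
      · simp only [if_neg h]

theorem lastOccFrom_le (n : Int) (xs : List Char) (c : Char) (j : Int)
    (h : lastOccFrom n xs c = some j) : n ≤ j := by
  induction xs generalizing n with
  | nil => simp [lastOccFrom] at h
  | cons x t ih =>
      simp only [lastOccFrom] at h
      cases hm : lastOccFrom (n + 1) t c with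
      | some j' => rw [hm] at h; cases h; have := ih (n + 1) hm; omega
      | none =>
          rw [hm] at h
          split_ifs at h with hx
          · cases h; omega

theorem mem_drop_iff_lastOcc (pre : List Char) (c : Char) (m : Nat) :
    c ∈ pre.drop m ↔ ∃ j : Int, lastOccFrom 0 pre c = some j ∧ (m : Int) ≤ j := by
  induction pre using List.reverseRecOn with
  | nil => simp [lastOccFrom]
  | append_singleton xs a ih =>
      rw [lastOccFrom_append_singleton, List.drop_append]
      by_cases hac : a = c
      · subst hac
        constructor
        · intro _
          exact ⟨(xs.length : Int), by norm_num, by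
            by_cases hm : m ≤ xs.length
            · exact_mod_cast hm
            · exfalso
              have h1 : xs.drop m = [] := List.drop_eq_nil_of_le (by omega)
              have h3 : ([a] : List Char).drop (m - xs.length) = [] :=
                List.drop_eq_nil_of_le (by simp; omega)
              simp_all⟩
        · rintro ⟨j, hj, hmj⟩
          have hj' : j = (xs.length : Int) := by
            have := hj; simp at this; omega
          have hm : m ≤ xs.length := by
            rw [hj'] at hmj; exact_mod_cast hmj
          have hdr : ([a] : List Char).drop (m - xs.length) = [a] := by
            have h0 : m - xs.length = 0 := by omega
            simp [h0]
          simp [hdr]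
      · rw [if_neg hac, ← ih]
        by_cases hm : m ≤ xs.length
        · have hdr : ([a] : List Char).drop (m - xs.length) = [a] := by
            have h0 : m - xs.length = 0 := by omega
            simp [h0]
          simp [hdr, Ne.symm hac]
        · have h1 : xs.drop m = [] := List.drop_eq_nil_of_le (by omega)
          by_cases hm1 : m ≤ xs.length + 1
          · have : m - xs.length = 0 ∨ m - xs.length = 1 := by omega
            rcases this with h | h <;> simp [h1, h, Ne.symm hac]
          · have h3 : ([a] : List Char).drop (m - xs.length) = [] :=
              List.drop_eq_nil_of_le (by simp; omega)
            simp [h1, h3]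

-- A's replacement test (via the last-seen position) equals the window-membership test
theorem hitA_eq_hitB (k : Int) (pre rest : List Char) (c : Char) :
    (match lastOccFrom 0 pre c with
      | some j => decide ((pre.length : Int) - j ≤ k)
      | none => false)
    = (PySem.List.slice (pre ++ rest) (some (max ((pre.length : Int) - k) 0))
        (some (pre.length : Int))).contains c := by
  rw [slice_window pre rest _ (le_max_right _ _)]
  apply Bool.eq_iff_iff.mpr
  rw [List.contains_iff_mem, mem_drop_iff_lastOcc]
  cases h : lastOccFrom 0 pre c with
  | none => simp
  | some j =>
      have hj0 : (0 : Int) ≤ j := lastOccFrom_le 0 pre c j h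
      simp only [Option.some.injEq, decide_eq_true_eq]
      constructor
      · intro hk; exact ⟨j, rfl, by omega⟩
      · rintro ⟨j', hj', hmj⟩; cases hj'; omega

-- loop invariant for A: goA over the remaining characters equals the window-membership map
theorem goA_eq_map (k : Int) (l : List Char) :
    ∀ (rest pre out : List Char) (d : PySem.Dict Char Int),
      pre ++ rest = l →
      (∀ c, d.get? c = lastOccFrom 0 pre c) →
      goA k (PySem.List.enumerate rest (pre.length : Int)) out d =
        out ++ (PySem.List.enumerate rest (pre.length : Int)).map (fun ic =>
          if (PySem.List.slice l (some (max (ic.1 - k) 0)) (some ic.1)).contains ic.2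
          then '-' else ic.2) := by
  intro rest
  induction rest with
  | nil => intro pre out d _ _; simp [goA, PySem.List.enumerate]
  | cons c rest' ih =>
      intro pre out d hl hd
      rw [PySem.List.enumerate_cons]
      simp only [goA, hd c]
      have hhit :
          (match lastOccFrom 0 pre c with
            | some j => decide ((pre.length : Int) - j ≤ k)
            | none => false)
          = (PySem.List.slice l (some (max ((pre.length : Int) - k) 0))
              (some (pre.length : Int))).contains c := by
        rw [← hl]; exact hitA_eq_hitB k pre (c :: rest') c
      have hstep := ih (pre ++ [c])
        (out ++ [if (PySem.List.slice l (some (max ((pre.length : Int) - k) 0))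
              (some (pre.length : Int))).contains c then '-' else c])
        (d.insert c (pre.length : Int))
        (by rw [← hl]; simp)
        (by
          intro c'
          rw [lastOccFrom_append_singleton, PySem.Dict.get?_insert]
          by_cases hcc : c = c'
          · subst hcc; simp
          · simp [hcc, Ne.symm hcc, hd c'])
      have hlen : ((pre ++ [c]).length : Int) = (pre.length : Int) + 1 := by
        simp
      rw [hlen] at hstep
      rw [hhit, hstep]
      simp

-- the window multiset is maintained correctly through one k > 0 step of B
theorem counts2_invariant (k : Int) (l pre : List Char) (c : Char) (rest' : List Char)
    (counts : PySem.Dict Char Int)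
    (hl : pre ++ c :: rest' = l)
    (hc : ∀ c', counts.getD c' 0 =
      ((pre.drop (max ((pre.length : Int) - k) 0).toNat).count c' : Int))
    (hk : k > 0) :
    ∀ c', (if 0 ≤ (pre.length : Int) - k then
              (counts.modify c 0 (· + 1)).modify
                ((PySem.List.pyGet? l ((pre.length : Int) - k)).getD ' ') 0 (· - 1)
            else counts.modify c 0 (· + 1)).getD c' 0
      = (((pre ++ [c]).drop (max (((pre ++ [c]).length : Int) - k) 0).toNat).count c' : Int) := by
  intro c'
  by_cases hj : 0 ≤ (pre.length : Int) - k
  · rw [if_pos hj]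
    have hmm : (max ((pre.length : Int) - k) 0).toNat = ((pre.length : Int) - k).toNat := by
      omega
    have hltp : ((pre.length : Int) - k).toNat < (pre ++ [c]).length := by simp; omega
    have hltl : ((pre.length : Int) - k).toNat < l.length := by rw [← hl]; simp; omega
    have hl' : (pre ++ [c]) ++ rest' = l := by rw [← hl]; simp
    have hpg : PySem.List.pyGet? l ((pre.length : Int) - k)
        = l[((pre.length : Int) - k).toNat]? := by
      conv_lhs => rw [← Int.toNat_of_nonneg hj]
      rw [PySem.List.pyGet?_natCast]
    have hgl : l[((pre.length : Int) - k).toNat]'hltl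
        = (pre ++ [c])[((pre.length : Int) - k).toNat]'hltp := by
      rw [List.getElem_of_eq hl'.symm hltl]
      exact List.getElem_append_left hltp
    have hgeq : (PySem.List.pyGet? l ((pre.length : Int) - k)).getD ' '
        = (pre ++ [c])[((pre.length : Int) - k).toNat]'hltp := by
      rw [hpg, List.getElem?_eq_getElem hltl, Option.getD_some, hgl]
    have hdropapp : (pre ++ [c]).drop (((pre.length : Int) - k).toNat)
        = pre.drop (((pre.length : Int) - k).toNat) ++ [c] :=
      List.drop_append_of_le_length (by omega)
    have hcons : (pre ++ [c]).drop (((pre.length : Int) - k).toNat)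
        = (pre ++ [c])[((pre.length : Int) - k).toNat]'hltp
          :: (pre ++ [c]).drop (((pre.length : Int) - k).toNat + 1) :=
      List.drop_eq_getElem_cons hltp
    have key := congrArg (List.count c') (hdropapp.symm.trans hcons)
    have hm' : (max (((pre ++ [c]).length : Int) - k) 0).toNat
        = ((pre.length : Int) - k).toNat + 1 := by simp; omega
    rw [hgeq]
    simp only [PySem.Dict.getD_modify, hc, hm', hmm]
    simp only [List.count_append, List.count_cons, beq_iff_eq] at key
    generalize (pre ++ [c])[((pre.length : Int) - k).toNat]'hltp = g at key ⊢
    clear hl hc hk hj hmm hltp hltl hl' hpg hgl hgeq hdropapp hcons hm'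
    split_ifs at key ⊢ <;> (try subst_vars) <;> (first | omega | exact_mod_cast key | simp_all)
  · rw [if_neg hj]
    have hz : (max ((pre.length : Int) - k) 0).toNat = 0 := by omega
    have hz' : (max (((pre ++ [c]).length : Int) - k) 0).toNat = 0 := by simp; omega
    simp only [PySem.Dict.getD_modify, hc, hz, hz']
    have hcnt : ((pre ++ [c]).drop 0).count c'
        = (pre.drop 0).count c' + (if c = c' then 1 else 0) := by
      simp [List.count_append, List.count_cons, beq_iff_eq]
    rw [hcnt]
    by_cases h2 : c' = c <;> simp [h2, Ne.symm]

-- loop invariant for B: goB over the remaining characters equals the same map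
theorem goB_eq_map (k : Int) (l : List Char) :
    ∀ (rest pre out : List Char) (counts : PySem.Dict Char Int),
      pre ++ rest = l →
      (∀ c, counts.getD c 0 =
        ((pre.drop (max ((pre.length : Int) - k) 0).toNat).count c : Int)) →
      goB l k (PySem.List.enumerate rest (pre.length : Int)) out counts =
        out ++ (PySem.List.enumerate rest (pre.length : Int)).map (fun ic =>
          if (PySem.List.slice l (some (max (ic.1 - k) 0)) (some ic.1)).contains ic.2
          then '-' else ic.2) := by
  intro rest
  induction rest with
  | nil => intro pre out counts _ _; simp [goB, PySem.List.enumerate]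
  | cons c rest' ih =>
      intro pre out counts hl hc
      rw [PySem.List.enumerate_cons]
      have hwin : PySem.List.slice l (some (max ((pre.length : Int) - k) 0))
          (some (pre.length : Int)) = pre.drop (max ((pre.length : Int) - k) 0).toNat := by
        rw [← hl]; exact slice_window pre (c :: rest') _ (le_max_right _ _)
      have hhit : (counts.getD c 0 > 0)
          ↔ ((PySem.List.slice l (some (max ((pre.length : Int) - k) 0))
              (some (pre.length : Int))).contains c = true) := by
        rw [hwin, List.contains_iff_mem, hc c, ← List.count_pos_iff]
        exact_mod_cast Iff.rfl
      simp only [goB]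
      rw [if_congr hhit rfl rfl]
      have hlen : ((pre ++ [c]).length : Int) = (pre.length : Int) + 1 := by simp
      by_cases hk : k > 0
      · rw [if_pos hk]
        have hstep := ih (pre ++ [c])
          (out ++ [if (PySem.List.slice l (some (max ((pre.length : Int) - k) 0))
                (some (pre.length : Int))).contains c then '-' else c])
          (if 0 ≤ (pre.length : Int) - k then
              (counts.modify c 0 (· + 1)).modify
                ((PySem.List.pyGet? l ((pre.length : Int) - k)).getD ' ') 0 (· - 1)
            else counts.modify c 0 (· + 1))
          (by rw [← hl]; simp)
          (counts2_invariant k l pre c rest' counts hl hc hk)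
        rw [hlen] at hstep
        rw [hstep]
        simp
      · rw [if_neg hk]
        have hstep := ih (pre ++ [c])
          (out ++ [if (PySem.List.slice l (some (max ((pre.length : Int) - k) 0))
                (some (pre.length : Int))).contains c then '-' else c])
          counts
          (by rw [← hl]; simp)
          (by
            intro c'
            rw [hc c']
            have hd1 : pre.drop (max ((pre.length : Int) - k) 0).toNat = [] :=
              List.drop_eq_nil_of_le (by omega)
            have hd2 : (pre ++ [c]).drop (max (((pre ++ [c]).length : Int) - k) 0).toNat = [] :=
              List.drop_eq_nil_of_le (by simp; omega)
            rw [hd1, hd2])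
        rw [hlen] at hstep
        rw [hstep]
        simp

-- ===== VERDICT (by name: the statement is the Claim_ definition above) =====
theorem replace_repeated_chars_spec : Claim_equal_replace_repeated_chars := by
  intro s k _
  unfold Spec_replace_repeated_chars replace_repeated_chars replace_repeated_chars_alt
  have hA := goA_eq_map k s.toList s.toList [] [] PySem.Dict.empty (by simp)
    (fun c => by simp [lastOccFrom])
  have hB := goB_eq_map k s.toList s.toList [] [] PySem.Dict.empty (by simp)
    (fun c => by simp)
  simp only [List.length_nil, Nat.cast_zero, List.nil_append] at hA hB
  rw [hA, hB]
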